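-- pv_equiv track=rewrite | github.com/MKanaar/Advent-of-code-2025 | 04/script2-1.py | get_removable_cells
-- ===== SOURCE A (Python) =====
-- def get_adjacent_papers(grid: list[list[int]], row: int, col: int) -> int:
--     adjacent = 0
--
--     if row > 0 and col > 0 and grid[row - 1][col - 1] == "@":
--         adjacent += 1  # Top-left
--     if row > 0 and grid[row - 1][col] == "@":
--         adjacent += 1  # Top
--     if row > 0 and col < len(grid[row]) - 1 and grid[row - 1][col + 1] == "@":
--         adjacent += 1  # Top-right
--     if col < len(grid[row]) - 1 and grid[row][col + 1] == "@":
--         adjacent += 1  # Right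
--     if (
--         row < len(grid) - 1
--         and col < len(grid[row]) - 1
--         and grid[row + 1][col + 1] == "@"
--     ):
--         adjacent += 1  # Bottom-right
--     if row < len(grid) - 1 and grid[row + 1][col] == "@":
--         adjacent += 1  # Bottom
--     if row < len(grid) - 1 and col > 0 and grid[row + 1][col - 1] == "@":
--         adjacent += 1  # Bottom-left
--     if col > 0 and grid[row][col - 1] == "@":
--         adjacent += 1  # Left
--
--     return adjacent
--
-- def get_removable_cells(grid: list[list[int]]) -> list[tuple[int, int]]:
--     to_remove: list[tuple[int, int]] = []
--
--     for row in range(len(grid)):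
--         for col in range(len(grid[row])):
--             current = grid[row][col]
--             if current == ".":
--                 continue
--
--             adjacent = get_adjacent_papers(grid, row, col)
--             if adjacent < 4:
--                 to_remove.append((row, col))
--
--     return to_remove
-- ===== SOURCE B (Python) =====
-- def get_removable_cells(grid: list[list[int]]) -> list[tuple[int, int]]:
--     R = len(grid)
--     C = len(grid[0]) if grid else 0
--
--     # Summed-area table: P[i][j] = number of '@' among grid[a][b] for a < i, b < j.
--     prev = [0] * (C + 1)
--     P = [prev]
--     for row in grid:
--         cur = [0]
--         s = 0
--         for j in range(C):
--             s += row[j] == "@"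
--             cur.append(prev[j + 1] + s)
--         P.append(cur)
--         prev = cur
--
--     to_remove: list[tuple[int, int]] = []
--     for r in range(R):
--         for c in range(C):
--             current = grid[r][c]
--             if current == ".":
--                 continue
--
--             r1, r2 = max(r - 1, 0), min(r + 2, R)
--             c1, c2 = max(c - 1, 0), min(c + 2, C)
--             total = P[r2][c2] - P[r1][c2] - P[r2][c1] + P[r1][c1]
--             if current == "@":
--                 total -= 1
--
--             if total < 4:
--                 to_remove.append((r, c))
--
--     return to_remove
-- ===== Notes on version B (the rewrite author's own statement) =====
-- stated objective: alternative
-- what changed: Replaces A's eight guarded per-cell neighbour probes with a 2D summed-area (prefix-sum) table built once, so each cell's 8-neighbour count is one O(1) inclusion-exclusion query minus the cell itself.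
-- outside the precondition, e.g. on get_removable_cells([['.', '.'], ['@']]): A returns [(1, 0)], B raises IndexError
import Mathlib
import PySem

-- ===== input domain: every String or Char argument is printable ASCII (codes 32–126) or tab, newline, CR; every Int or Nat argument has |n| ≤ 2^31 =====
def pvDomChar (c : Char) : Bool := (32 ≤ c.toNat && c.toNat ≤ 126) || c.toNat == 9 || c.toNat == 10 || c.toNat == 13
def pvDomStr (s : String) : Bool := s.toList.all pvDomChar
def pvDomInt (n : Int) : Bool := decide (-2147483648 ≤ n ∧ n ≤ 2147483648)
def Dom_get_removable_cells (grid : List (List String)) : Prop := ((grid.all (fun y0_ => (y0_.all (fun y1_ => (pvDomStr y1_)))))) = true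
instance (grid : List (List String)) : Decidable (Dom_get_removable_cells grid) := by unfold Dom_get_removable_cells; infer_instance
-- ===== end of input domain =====

-- B builds a 2D summed-area (prefix-sum) table once and answers each cell's 8-neighbour
-- count by one inclusion-exclusion query minus the cell itself, instead of A's eight
-- guarded per-cell probes (objective: alternative).

-- ===== PORT A =====
def get_adjacent_papers (grid : List (List String)) (row col : Int) : Int :=
  let adjacent : Int := 0
  let adjacent := if 0 < row ∧ 0 < col ∧ PySem.List.pyGetD (PySem.List.pyGetD grid (row - 1) []) (col - 1) "" = "@" then adjacent + 1 else adjacent  -- Top-left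
  let adjacent := if 0 < row ∧ PySem.List.pyGetD (PySem.List.pyGetD grid (row - 1) []) col "" = "@" then adjacent + 1 else adjacent  -- Top
  let adjacent := if 0 < row ∧ col < PySem.List.len (PySem.List.pyGetD grid row []) - 1 ∧ PySem.List.pyGetD (PySem.List.pyGetD grid (row - 1) []) (col + 1) "" = "@" then adjacent + 1 else adjacent  -- Top-right
  let adjacent := if col < PySem.List.len (PySem.List.pyGetD grid row []) - 1 ∧ PySem.List.pyGetD (PySem.List.pyGetD grid row []) (col + 1) "" = "@" then adjacent + 1 else adjacent  -- Right
  let adjacent := if row < PySem.List.len grid - 1 ∧ col < PySem.List.len (PySem.List.pyGetD grid row []) - 1 ∧ PySem.List.pyGetD (PySem.List.pyGetD grid (row + 1) []) (col + 1) "" = "@" then adjacent + 1 else adjacent  -- Bottom-right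
  let adjacent := if row < PySem.List.len grid - 1 ∧ PySem.List.pyGetD (PySem.List.pyGetD grid (row + 1) []) col "" = "@" then adjacent + 1 else adjacent  -- Bottom
  let adjacent := if row < PySem.List.len grid - 1 ∧ 0 < col ∧ PySem.List.pyGetD (PySem.List.pyGetD grid (row + 1) []) (col - 1) "" = "@" then adjacent + 1 else adjacent  -- Bottom-left
  let adjacent := if 0 < col ∧ PySem.List.pyGetD (PySem.List.pyGetD grid row []) (col - 1) "" = "@" then adjacent + 1 else adjacent  -- Left
  adjacent

def get_removable_cells (grid : List (List String)) : List (Int × Int) :=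
  let to_remove : List (Int × Int) := []
  (PySem.List.pyRange 0 (PySem.List.len grid)).foldl (fun to_remove row =>
    (PySem.List.pyRange 0 (PySem.List.len (PySem.List.pyGetD grid row []))).foldl (fun to_remove col =>
      let current := PySem.List.pyGetD (PySem.List.pyGetD grid row []) col ""
      if current = "." then to_remove
      else
        let adjacent := get_adjacent_papers grid row col
        if adjacent < 4 then to_remove ++ [(row, col)] else to_remove) to_remove) to_remove

-- ===== PORT B =====
def get_removable_cells_alt (grid : List (List String)) : List (Int × Int) :=
  let R := PySem.List.len grid
  let C := if grid = [] then (0 : Int) else PySem.List.len (PySem.List.pyGetD grid 0 [])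
  let prev0 : List Int := List.replicate (C + 1).toNat 0
  let st := grid.foldl (fun (st : List (List Int) × List Int) row =>
      let cur := ((PySem.List.pyRange 0 C).foldl (fun (cs : List Int × Int) j =>
          let s := cs.2 + (if PySem.List.pyGetD row j "" = "@" then 1 else 0)
          (cs.1 ++ [PySem.List.pyGetD st.2 (j + 1) 0 + s], s)) ([0], 0)).1
      (st.1 ++ [cur], cur)) ([prev0], prev0)
  let P := st.1
  (PySem.List.pyRange 0 R).foldl (fun to_remove r =>
    (PySem.List.pyRange 0 C).foldl (fun to_remove c =>
      let current := PySem.List.pyGetD (PySem.List.pyGetD grid r []) c ""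
      if current = "." then to_remove
      else
        let r1 := max (r - 1) 0
        let r2 := min (r + 2) R
        let c1 := max (c - 1) 0
        let c2 := min (c + 2) C
        let total := PySem.List.pyGetD (PySem.List.pyGetD P r2 []) c2 0
                   - PySem.List.pyGetD (PySem.List.pyGetD P r1 []) c2 0
                   - PySem.List.pyGetD (PySem.List.pyGetD P r2 []) c1 0
                   + PySem.List.pyGetD (PySem.List.pyGetD P r1 []) c1 0
        let total := if current = "@" then total - 1 else total
        if total < 4 then to_remove ++ [(r, c)] else to_remove) to_remove) []

-- ===== PRECONDITION & SPEC =====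
-- Pre_ excludes jagged grids (rows of unequal length): there A clamps its column guards to the
-- CURRENT row's length, so its neighbour reads raise IndexError on almost any non-'.' cell at a
-- ragged edge (and B's table build reads row[j] for j < len(grid[0]) and raises on short rows);
-- all rectangular grids (the puzzle's inputs) are admitted.
def Pre_get_removable_cells (grid : List (List String)) : Prop :=
  ∀ row ∈ grid, row.length = (grid.headD []).length
instance (grid : List (List String)) : Decidable (Pre_get_removable_cells grid) := by unfold Pre_get_removable_cells; infer_instance

def pvWitness_get_removable_cells : List (List String) := [["@", ".", "x"], [".", "@", "@"]]

def Spec_get_removable_cells (grid : List (List String)) (out : List (Int × Int)) : Prop := out = get_removable_cells_alt grid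
instance (grid : List (List String)) (out : List (Int × Int)) : Decidable (Spec_get_removable_cells grid out) := by unfold Spec_get_removable_cells; infer_instance

-- ===== CLAIM (what is proved, stated in full; the proofs are below) =====
def Claim_equal_get_removable_cells : Prop := ∀ (grid : List (List String)), Dom_get_removable_cells grid → Pre_get_removable_cells grid → Spec_get_removable_cells grid (get_removable_cells grid)

-- ===== LEMMAS AND PROOFS =====

-- indicator of an optional cell holding "@"
def pvInd (o : Option String) : Int := if o = some "@" then 1 else 0
-- indicator of (possibly out-of-range) column j of a row holding "@"
def pvCol (xs : List String) (j : Int) : Int := if 0 ≤ j then pvInd xs[j.toNat]? else 0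
-- '@'-count of the clamped 3-window of a row around column c
def pvWin3 (xs : List String) (c : Int) : Int := pvCol xs (c - 1) + pvCol xs c + pvCol xs (c + 1)
-- one 0/1 term of the 3×3 window
def pvCell (grid : List (List String)) (i j : Int) : Int :=
  if 0 ≤ i then (grid[i.toNat]?.elim 0 (fun row => pvCol row j)) else 0
-- '@'-count of the first j cells of a row
def pvRp (xs : List String) (j : Nat) : Int := ((xs.take j).count "@" : Int)
-- summed-area value: '@'-count of the first i rows restricted to the first j columns
def pvPref (g : List (List String)) (i j : Nat) : Int := ((g.take i).map (fun row => pvRp row j)).sum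

lemma pvRp_zero (xs : List String) : pvRp xs 0 = 0 := by simp [pvRp]

lemma pvRp_succ (xs : List String) (j : Nat) :
    pvRp xs (j + 1) = pvRp xs j + (if PySem.List.pyGetD xs (j : Int) "" = "@" then 1 else 0) := by
  rw [PySem.List.pyGetD_natCast]
  unfold pvRp
  rw [List.take_add_one, List.count_append]
  cases h : xs[j]? with
  | none => simp [List.getD, h]
  | some a =>
    simp only [List.getD, h, Option.toList, Option.getD, List.count_singleton]
    push_cast
    by_cases ha : a = "@" <;> simp [ha, beq_iff_eq]

lemma pvCol_natCast (xs : List String) (n : Nat) : pvCol xs (n : Int) = pvInd xs[n]? := by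
  simp [pvCol]

lemma pvRowWin (xs : List String) (c : Nat) :
    pvRp xs (c + 2) - pvRp xs (c - 1) = pvWin3 xs (c : Int) := by
  unfold pvWin3
  cases c with
  | zero =>
    rw [show (0:Nat) - 1 = 0 from rfl, show (0:Nat) + 2 = 0 + 1 + 1 from rfl,
        pvRp_succ, pvRp_succ, pvRp_zero]
    rw [show ((0:Nat):Int) - 1 = -1 by omega]
    rw [show pvCol xs (-1) = 0 by simp [pvCol]]
    rw [show ((0:Nat):Int) = ((0:Nat):Int) from rfl, pvCol_natCast]
    rw [show ((0:Nat):Int) + 1 = ((1:Nat):Int) by omega, pvCol_natCast]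
    rw [show ((0:Nat):Int) = ((0:Nat):Int) from rfl]
    unfold pvInd
    rw [PySem.List.pyGetD_natCast, PySem.List.pyGetD_natCast]
    cases h0 : xs[0]? <;> cases h1 : xs[1]? <;> simp [List.getD, h0, h1]
  | succ n =>
    rw [show (n+1) - 1 = n from rfl, show (n+1) + 2 = n + 1 + 1 + 1 from rfl,
        pvRp_succ, pvRp_succ, pvRp_succ]
    rw [show ((n+1:Nat):Int) - 1 = ((n:Nat):Int) by omega, pvCol_natCast,
        show ((n+1:Nat):Int) = ((n+1:Nat):Int) from rfl, pvCol_natCast,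
        show ((n+1:Nat):Int) + 1 = ((n+2:Nat):Int) by omega, pvCol_natCast]
    unfold pvInd
    rw [PySem.List.pyGetD_natCast, PySem.List.pyGetD_natCast, PySem.List.pyGetD_natCast]
    cases h0 : xs[n]? <;> cases h1 : xs[n+1]? <;> cases h2 : xs[n+2]? <;>
      simp [List.getD, h0, h1, h2] <;> (try split) <;> (try split) <;> (try split) <;> simp_all <;> ring

lemma pvRp_clamp (xs : List String) (m Cn : Nat) (h : xs.length ≤ Cn) :
    pvRp xs (min m Cn) = pvRp xs m := by
  unfold pvRp
  rcases Nat.lt_or_ge Cn m with hm | hm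
  · rw [min_eq_right hm.le, List.take_of_length_le h, List.take_of_length_le (by omega)]
  · rw [min_eq_left hm]

lemma pvPref_zero (g : List (List String)) (j : Nat) : pvPref g 0 j = 0 := by simp [pvPref]

lemma pvPref_succ (g : List (List String)) (i j : Nat) :
    pvPref g (i + 1) j = pvPref g i j + (g[i]?.elim 0 (fun row => pvRp row j)) := by
  unfold pvPref
  rw [List.take_add_one, List.map_append, List.sum_append]
  cases g[i]? <;> simp

lemma pvPref_clamp (g : List (List String)) (m j : Nat) :
    pvPref g (min m g.length) j = pvPref g m j := by
  unfold pvPref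
  rcases Nat.lt_or_ge g.length m with hm | hm
  · rw [min_eq_right hm.le, List.take_of_length_le le_rfl, List.take_of_length_le (by omega)]
  · rw [min_eq_left hm]

-- the inner table-row loop builds prefix row f + running row count
lemma pvBuildAux (row : List String) (C : Nat) (f : Nat → Int) (hf0 : f 0 = 0)
    (n : Nat) (hn : n ≤ C) :
    (PySem.List.pyRange 0 (n : Int)).foldl (fun (cs : List Int × Int) j =>
        let s := cs.2 + (if PySem.List.pyGetD row j "" = "@" then 1 else 0)
        (cs.1 ++ [PySem.List.pyGetD ((List.range (C+1)).map f) (j + 1) 0 + s], s)) ([0], 0)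
    = ((List.range (n+1)).map (fun j => f j + pvRp row j), pvRp row n) := by
  induction n with
  | zero =>
    rw [PySem.List.pyRange_one_eq_nil (by omega)]
    simp [pvRp_zero, hf0]
  | succ n ih =>
    rw [show ((n+1:Nat):Int) = ((n:Nat):Int) + 1 by omega,
        PySem.List.pyRange_one_succ_right (by positivity), List.foldl_append,
        ih (by omega)]
    simp only [List.foldl_cons, List.foldl_nil]
    rw [show ((n:Nat):Int) + 1 = ((n+1:Nat):Int) by omega, PySem.List.pyGetD_natCast,
        PySem.List.getD_map_range f (C+1) (n+1) 0 (by omega)]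
    rw [← pvRp_succ]
    rw [show (List.range (n+1)).map (fun j => f j + pvRp row j) ++ [f (n+1) + pvRp row (n+1)]
          = (List.range (n+1+1)).map (fun j => f j + pvRp row j) by
        conv_rhs => rw [List.range_succ]
        rw [List.map_append]; rfl]

lemma pvPref_cons (row : List String) (rows : List (List String)) (i j : Nat) :
    pvPref (row :: rows) (i + 1) j = pvRp row j + pvPref rows i j := by
  unfold pvPref
  rw [List.take_succ_cons, List.map_cons, List.sum_cons]

-- the outer table loop builds the summed-area rows
lemma pvOuter (C : Nat) (rows : List (List String)) (acc : List (List Int)) (f : Nat → Int)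
    (hf0 : f 0 = 0) :
    rows.foldl (fun (st : List (List Int) × List Int) row =>
        let cur := ((PySem.List.pyRange 0 (C : Int)).foldl (fun (cs : List Int × Int) j =>
            let s := cs.2 + (if PySem.List.pyGetD row j "" = "@" then 1 else 0)
            (cs.1 ++ [PySem.List.pyGetD st.2 (j + 1) 0 + s], s)) ([0], 0)).1
        (st.1 ++ [cur], cur))
      (acc ++ [(List.range (C+1)).map f], (List.range (C+1)).map f)
    = (acc ++ (List.range (rows.length+1)).map
          (fun i => (List.range (C+1)).map (fun j => f j + pvPref rows i j)),
       (List.range (C+1)).map (fun j => f j + pvPref rows rows.length j)) := by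
  induction rows generalizing acc f with
  | nil =>
    simp only [List.foldl_nil, List.length_nil]
    rw [Prod.mk.injEq]
    refine ⟨?_, ?_⟩
    · congr 1
      simp [pvPref_zero]
    · simp [pvPref_zero]
  | cons row rows ih =>
    rw [List.foldl_cons]
    simp only
    rw [pvBuildAux row C f hf0 C le_rfl]
    simp only
    rw [show acc ++ [(List.range (C+1)).map f] ++ [(List.range (C+1)).map (fun j => f j + pvRp row j)]
          = (acc ++ [(List.range (C+1)).map f]) ++ [(List.range (C+1)).map (fun j => f j + pvRp row j)] by
        rw [List.append_assoc]]
    rw [ih (acc ++ [(List.range (C+1)).map f]) (fun j => f j + pvRp row j) (by simp [hf0, pvRp_zero])]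
    rw [Prod.mk.injEq]
    refine ⟨?_, ?_⟩
    · rw [List.append_assoc]
      congr 1
      rw [show (row :: rows).length + 1 = ((rows.length + 1) + 1) by simp,
          List.range_succ_eq_map (n := rows.length + 1), List.map_cons, List.map_map,
          List.singleton_append]
      congr 1
      · apply List.map_congr_left
        intro j _
        simp [pvPref_zero]
      · apply List.map_congr_left
        intro i _
        apply List.map_congr_left
        intro j _
        simp only [Nat.succ_eq_add_one, pvPref_cons]
        ring
    · rw [show (row :: rows).length = rows.length + 1 by simp]
      apply List.map_congr_left
      intro j _
      rw [pvPref_cons]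
      ring

def pvRowW (grid : List (List String)) (c : Int) (i : Int) : Int :=
  if 0 ≤ i then (grid[i.toNat]?.elim 0 (fun row => pvWin3 row c)) else 0

lemma pvRowW_natCast (g : List (List String)) (c : Int) (i : Nat) :
    pvRowW g c (i : Int) = g[i]?.elim 0 (fun row => pvWin3 row c) := by
  simp [pvRowW]

lemma pvEdiff (g : List (List String)) (Cn : Nat) (hrect : ∀ row ∈ g, row.length = Cn)
    (c : Nat) (i : Nat) :
    (g[i]?.elim 0 (fun row => pvRp row (min (c+2) Cn)))
      - (g[i]?.elim 0 (fun row => pvRp row (c-1))) = pvRowW g (c : Int) (i : Int) := by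
  rw [pvRowW_natCast]
  cases h : g[i]? with
  | none => simp
  | some row =>
    simp only [Option.elim]
    rw [pvRp_clamp row (c+2) Cn (by rw [hrect row (List.mem_of_getElem? h)]), pvRowWin]

lemma pvQuery (g : List (List String)) (Cn : Nat) (hrect : ∀ row ∈ g, row.length = Cn)
    (r c : Nat) :
    pvPref g (min (r+2) g.length) (min (c+2) Cn) - pvPref g (r-1) (min (c+2) Cn)
      - pvPref g (min (r+2) g.length) (c-1) + pvPref g (r-1) (c-1)
    = pvRowW g (c : Int) ((r : Int) - 1) + pvRowW g (c : Int) (r : Int)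
      + pvRowW g (c : Int) ((r : Int) + 1) := by
  rw [pvPref_clamp, pvPref_clamp]
  cases r with
  | zero =>
    rw [show (0:Nat) - 1 = 0 from rfl, pvPref_zero, pvPref_zero,
        show (0:Nat) + 2 = 0 + 1 + 1 from rfl]
    simp only [pvPref_succ, pvPref_zero]
    rw [show ((0:Nat):Int) - 1 = -1 by omega, show pvRowW g (c:Int) (-1) = 0 by simp [pvRowW],
        show ((0:Nat):Int) + 1 = ((1:Nat):Int) by omega]
    have h0 := pvEdiff g Cn hrect c 0
    have h1 := pvEdiff g Cn hrect c 1
    linarith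
  | succ n =>
    rw [show (n+1) - 1 = n from rfl, show (n+1) + 2 = n + 1 + 1 + 1 from rfl,
        ]
    simp only [pvPref_succ]
    rw [show ((n+1:Nat):Int) - 1 = ((n:Nat):Int) by omega,
        show ((n+1:Nat):Int) + 1 = ((n+2:Nat):Int) by omega]
    have h0 := pvEdiff g Cn hrect c n
    have h1 := pvEdiff g Cn hrect c (n+1)
    have h2 := pvEdiff g Cn hrect c (n+2)
    linarith

lemma pvRowW_split (grid : List (List String)) (c i : Int) :
    pvRowW grid c i = pvCell grid i (c - 1) + pvCell grid i c + pvCell grid i (c + 1) := by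
  unfold pvRowW pvCell pvWin3
  split
  · cases grid[i.toNat]? <;> simp
  · simp

-- characterisation of a window term on a rectangular grid
lemma pvCell_char (grid : List (List String)) (W : Nat) (hrect : ∀ row ∈ grid, row.length = W)
    (i j : Int) :
    pvCell grid i j =
      if 0 ≤ i ∧ i < (grid.length : Int) ∧ 0 ≤ j ∧ j < (W : Int) ∧
          PySem.List.pyGetD (PySem.List.pyGetD grid i []) j "" = "@" then 1 else 0 := by
  unfold pvCell pvCol pvInd
  by_cases hi : 0 ≤ i
  · by_cases hiR : i < (grid.length : Int)
    · have h1 : i.toNat < grid.length := by omega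
      have hg : PySem.List.pyGetD grid i [] = grid[i.toNat] :=
        PySem.List.pyGetD_eq_getElem grid [] hi hiR
      have hW : (grid[i.toNat]).length = W := hrect _ (List.getElem_mem h1)
      rw [if_pos hi, List.getElem?_eq_getElem h1, hg]
      simp only [Option.elim]
      by_cases hj : 0 ≤ j
      · by_cases hjW : j < (W : Int)
        · have h2 : j.toNat < (grid[i.toNat]).length := by omega
          rw [if_pos hj, List.getElem?_eq_getElem h2,
              PySem.List.pyGetD_eq_getElem _ _ hj (by omega)]
          simp only [Option.some.injEq]
          split <;> [rw [if_pos (by tauto)]; rw [if_neg (by tauto)]]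
        · have h2 : ¬ j.toNat < (grid[i.toNat]).length := by omega
          rw [if_pos hj, List.getElem?_eq_none (by omega), if_neg (by simp), if_neg (by tauto)]
      · rw [if_neg hj, if_neg (by tauto)]
    · rw [if_pos hi, List.getElem?_eq_none (by omega), if_neg (by tauto)]
      simp
  · rw [if_neg hi, if_neg (by tauto)]

lemma pvIteAcc (P : Prop) [Decidable P] (a : Int) : (if P then a + 1 else a) = a + (if P then 1 else 0) := by
  split <;> simp

lemma pvIte01_congr {P Q : Prop} [Decidable P] [Decidable Q] (h : P ↔ Q) :
    (if P then (1 : Int) else 0) = if Q then 1 else 0 := if_congr h rfl rfl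

-- A's eight guarded checks are the 3×3 window terms minus the centre, on a rectangular grid
lemma pvGap_eq (grid : List (List String)) (W : Nat) (hrect : ∀ row ∈ grid, row.length = W)
    (r c : Int) (hr0 : 0 ≤ r) (hrR : r < (grid.length : Int)) (hc0 : 0 ≤ c) (hcW : c < (W : Int)) :
    get_adjacent_papers grid r c
      = pvCell grid (r-1) (c-1) + pvCell grid (r-1) c + pvCell grid (r-1) (c+1)
        + pvCell grid r (c+1)
        + pvCell grid (r+1) (c+1) + pvCell grid (r+1) c + pvCell grid (r+1) (c-1)
        + pvCell grid r (c-1) := by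
  have hr1 : r.toNat < grid.length := by omega
  have hg : PySem.List.pyGetD grid r [] = grid[r.toNat] :=
    PySem.List.pyGetD_eq_getElem grid [] hr0 hrR
  have hlen : PySem.List.len (PySem.List.pyGetD grid r []) = (W : Int) := by
    rw [hg]; simp [hrect _ (List.getElem_mem hr1)]
  have t1 : (if 0 < r ∧ 0 < c ∧ PySem.List.pyGetD (PySem.List.pyGetD grid (r - 1) []) (c - 1) "" = "@" then (1:Int) else 0) = pvCell grid (r-1) (c-1) := by
    rw [pvCell_char grid W hrect]; apply pvIte01_congr
    exact ⟨fun ⟨h1,h2,h3⟩ => ⟨by omega, by omega, by omega, by omega, h3⟩, fun ⟨h1,h2,h3,h4,h5⟩ => ⟨by omega, by omega, h5⟩⟩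
  have t2 : (if 0 < r ∧ PySem.List.pyGetD (PySem.List.pyGetD grid (r - 1) []) c "" = "@" then (1:Int) else 0) = pvCell grid (r-1) c := by
    rw [pvCell_char grid W hrect]; apply pvIte01_congr
    exact ⟨fun ⟨h1,h3⟩ => ⟨by omega, by omega, by omega, by omega, h3⟩, fun ⟨h1,h2,h3,h4,h5⟩ => ⟨by omega, h5⟩⟩
  have t3 : (if 0 < r ∧ c < (W:Int) - 1 ∧ PySem.List.pyGetD (PySem.List.pyGetD grid (r - 1) []) (c + 1) "" = "@" then (1:Int) else 0) = pvCell grid (r-1) (c+1) := by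
    rw [pvCell_char grid W hrect]; apply pvIte01_congr
    exact ⟨fun ⟨h1,h2,h3⟩ => ⟨by omega, by omega, by omega, by omega, h3⟩, fun ⟨h1,h2,h3,h4,h5⟩ => ⟨by omega, by omega, h5⟩⟩
  have t4 : (if c < (W:Int) - 1 ∧ PySem.List.pyGetD (PySem.List.pyGetD grid r []) (c + 1) "" = "@" then (1:Int) else 0) = pvCell grid r (c+1) := by
    rw [pvCell_char grid W hrect]; apply pvIte01_congr
    exact ⟨fun ⟨h2,h3⟩ => ⟨by omega, by omega, by omega, by omega, h3⟩, fun ⟨h1,h2,h3,h4,h5⟩ => ⟨by omega, h5⟩⟩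
  have t5 : (if r < (grid.length:Int) - 1 ∧ c < (W:Int) - 1 ∧ PySem.List.pyGetD (PySem.List.pyGetD grid (r + 1) []) (c + 1) "" = "@" then (1:Int) else 0) = pvCell grid (r+1) (c+1) := by
    rw [pvCell_char grid W hrect]; apply pvIte01_congr
    exact ⟨fun ⟨h1,h2,h3⟩ => ⟨by omega, by omega, by omega, by omega, h3⟩, fun ⟨h1,h2,h3,h4,h5⟩ => ⟨by omega, by omega, h5⟩⟩
  have t6 : (if r < (grid.length:Int) - 1 ∧ PySem.List.pyGetD (PySem.List.pyGetD grid (r + 1) []) c "" = "@" then (1:Int) else 0) = pvCell grid (r+1) c := by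
    rw [pvCell_char grid W hrect]; apply pvIte01_congr
    exact ⟨fun ⟨h1,h3⟩ => ⟨by omega, by omega, by omega, by omega, h3⟩, fun ⟨h1,h2,h3,h4,h5⟩ => ⟨by omega, h5⟩⟩
  have t7 : (if r < (grid.length:Int) - 1 ∧ 0 < c ∧ PySem.List.pyGetD (PySem.List.pyGetD grid (r + 1) []) (c - 1) "" = "@" then (1:Int) else 0) = pvCell grid (r+1) (c-1) := by
    rw [pvCell_char grid W hrect]; apply pvIte01_congr
    exact ⟨fun ⟨h1,h2,h3⟩ => ⟨by omega, by omega, by omega, by omega, h3⟩, fun ⟨h1,h2,h3,h4,h5⟩ => ⟨by omega, by omega, h5⟩⟩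
  have t8 : (if 0 < c ∧ PySem.List.pyGetD (PySem.List.pyGetD grid r []) (c - 1) "" = "@" then (1:Int) else 0) = pvCell grid r (c-1) := by
    rw [pvCell_char grid W hrect]; apply pvIte01_congr
    exact ⟨fun ⟨h2,h3⟩ => ⟨by omega, by omega, by omega, by omega, h3⟩, fun ⟨h1,h2,h3,h4,h5⟩ => ⟨by omega, h5⟩⟩
  simp only [get_adjacent_papers, hlen, pvIteAcc, PySem.List.len_eq]
  rw [t1, t2, t3, t4, t5, t6, t7, t8]
  ring

-- the centre term
lemma pvSelf (grid : List (List String)) (W : Nat) (hrect : ∀ row ∈ grid, row.length = W)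
    (r c : Int) (hr0 : 0 ≤ r) (hrR : r < (grid.length : Int)) (hc0 : 0 ≤ c) (hcW : c < (W : Int)) :
    pvCell grid r c = if PySem.List.pyGetD (PySem.List.pyGetD grid r []) c "" = "@" then 1 else 0 := by
  rw [pvCell_char grid W hrect]
  exact pvIte01_congr ⟨fun h => h.2.2.2.2, fun h => ⟨hr0, hrR, hc0, hcW, h⟩⟩

-- table lookup on the materialised summed-area rows
lemma pvPAt (g : List (List String)) (Cn : Nat) (i j : Nat) (hi : i ≤ g.length) (hj : j ≤ Cn) :
    PySem.List.pyGetD (PySem.List.pyGetD ((List.range (g.length+1)).map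
        (fun i => (List.range (Cn+1)).map (fun j => (0:Int) + pvPref g i j))) (i : Int) []) (j : Int) 0
      = pvPref g i j := by
  rw [PySem.List.pyGetD_natCast, PySem.List.pyGetD_natCast,
      PySem.List.getD_map_range _ _ _ _ (by omega), PySem.List.getD_map_range _ _ _ _ (by omega),
      zero_add]

lemma pvC_eq (grid : List (List String)) :
    (if grid = [] then (0 : Int) else PySem.List.len (PySem.List.pyGetD grid 0 [])) =
      ((grid.headD []).length : Int) := by
  cases grid <;> simp [PySem.List.pyGetD_zero_cons, PySem.List.len_eq]

theorem get_removable_cells_spec : Claim_equal_get_removable_cells := by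
  unfold Claim_equal_get_removable_cells
  intro grid _ hpre
  unfold Spec_get_removable_cells Pre_get_removable_cells at *
  simp only [get_removable_cells, get_removable_cells_alt]
  rw [pvC_eq]
  have hrep : List.replicate ((((grid.headD []).length : Int)) + 1).toNat (0:Int)
      = (List.range ((grid.headD []).length + 1)).map (fun _ => (0:Int)) := by
    rw [List.map_const', List.length_range, show ((((grid.headD []).length : Int)) + 1).toNat
        = (grid.headD []).length + 1 by omega]
  rw [hrep]
  have hP := pvOuter (grid.headD []).length grid [] (fun _ => (0:Int)) rfl
  simp only [List.nil_append] at hP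
  have hP1 := congrArg Prod.fst hP
  rw [hP1]
  apply PySem.List.foldl_congr_mem
  intro acc r hrmem
  obtain ⟨hr0, hrR⟩ := PySem.List.mem_pyRange_one.mp hrmem
  rw [PySem.List.len_eq] at hrR
  have hg : PySem.List.pyGetD grid r [] = grid[r.toNat] :=
    PySem.List.pyGetD_eq_getElem grid [] hr0 (by omega)
  have hW : PySem.List.len (PySem.List.pyGetD grid r []) = ((grid.headD []).length : Int) := by
    rw [hg, PySem.List.len_eq, hpre _ (List.getElem_mem (by omega))]
  rw [hW]
  apply PySem.List.foldl_congr_mem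
  intro acc2 c hcmem
  obtain ⟨hc0, hcR⟩ := PySem.List.mem_pyRange_one.mp hcmem
  obtain ⟨rn, rfl⟩ := Int.eq_ofNat_of_zero_le hr0
  obtain ⟨cn, rfl⟩ := Int.eq_ofNat_of_zero_le hc0
  have hrn : rn < grid.length := by omega
  have hcn : cn < (grid.headD []).length := by exact_mod_cast hcR
  by_cases hdot : PySem.List.pyGetD (PySem.List.pyGetD grid (rn:Int) []) (cn:Int) "" = "."
  · rw [if_pos hdot, if_pos hdot]
  · rw [if_neg hdot, if_neg hdot]
    rw [PySem.List.len_eq,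
        show min ((rn:Int) + 2) ((grid.length:Int)) = ((min (rn+2) grid.length : Nat) : Int) by omega,
        show max ((rn:Int) - 1) 0 = (((rn-1 : Nat)) : Int) by omega,
        show min ((cn:Int) + 2) (((grid.headD []).length:Int)) = ((min (cn+2) (grid.headD []).length : Nat) : Int) by omega,
        show max ((cn:Int) - 1) 0 = (((cn-1 : Nat)) : Int) by omega]
    rw [pvPAt grid _ _ _ (by omega) (by omega), pvPAt grid _ _ _ (by omega) (by omega),
        pvPAt grid _ _ _ (by omega) (by omega), pvPAt grid _ _ _ (by omega) (by omega)]
    have hQ := pvQuery grid (grid.headD []).length hpre rn cn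
    have hG := pvGap_eq grid (grid.headD []).length hpre (rn:Int) (cn:Int) (by omega)
      (by omega) (by omega) (by exact_mod_cast hcR)
    have hS := pvSelf grid (grid.headD []).length hpre (rn:Int) (cn:Int) (by omega)
      (by omega) (by omega) (by exact_mod_cast hcR)
    by_cases hat : PySem.List.pyGetD (PySem.List.pyGetD grid (rn:Int) []) (cn:Int) "" = "@"
    · rw [if_pos hat]
      rw [if_pos hat] at hS
      have : get_adjacent_papers grid (rn:Int) (cn:Int) =
          pvPref grid (min (rn+2) grid.length) (min (cn+2) (grid.headD []).length)
            - pvPref grid (rn-1) (min (cn+2) (grid.headD []).length)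
            - pvPref grid (min (rn+2) grid.length) (cn-1) + pvPref grid (rn-1) (cn-1) - 1 := by
        rw [hQ, pvRowW_split, pvRowW_split, pvRowW_split, hG, ← hS]
        ring
      rw [this]
    · rw [if_neg hat]
      rw [if_neg hat] at hS
      have : get_adjacent_papers grid (rn:Int) (cn:Int) =
          pvPref grid (min (rn+2) grid.length) (min (cn+2) (grid.headD []).length)
            - pvPref grid (rn-1) (min (cn+2) (grid.headD []).length)
            - pvPref grid (min (rn+2) grid.length) (cn-1) + pvPref grid (rn-1) (cn-1) := by
        rw [hQ, pvRowW_split, pvRowW_split, pvRowW_split, hG]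
        have := hS
        linarith
      rw [this]
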